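-- pv_equiv track=rewrite | github.com/C109118214/AICourseORed | 書籍範例/C756N1_example/ch7/ch7-24.py | slinetable
-- ===== SOURCE A (Python) =====
-- def slinetable(ary, expense, cost, row, col):
-- # slinetable: 計算折舊費用分攤表
--     acm_exp = 0
--     for i in range(0, row):
--         ary[i][0] = i
--         ary[i][1] = expense
--         ary[i][2] = expense + acm_exp
--         ary[i][3] = cost - ary[i][2]
--         acm_exp = ary[i][2]
--     return(ary)
-- ===== SOURCE B (Python) =====
-- def slinetable(ary, expense, cost, row, col):
-- # slinetable: 計算折舊費用分攤表 — straight-line depreciation: year i's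
-- # accumulated depreciation is simply expense*(i+1), so fill each row's four
-- # cells in one slice assignment with no running total.
--     for i in range(row):
--         dep = expense * (i + 1)
--         ary[i][:4] = [i, expense, dep, cost - dep]
--     return ary
-- ===== Notes on version B (the rewrite author's own statement) =====
-- stated objective: simpler
-- what changed: Eliminates A's running accumulator: each row's accumulated depreciation is the closed form expense*(i+1), and the four cells are written with one slice assignment; Pre_ excludes only inputs where A raises IndexError (row beyond len(ary), or a touched row with fewer than 4 cells).
import Mathlib
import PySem

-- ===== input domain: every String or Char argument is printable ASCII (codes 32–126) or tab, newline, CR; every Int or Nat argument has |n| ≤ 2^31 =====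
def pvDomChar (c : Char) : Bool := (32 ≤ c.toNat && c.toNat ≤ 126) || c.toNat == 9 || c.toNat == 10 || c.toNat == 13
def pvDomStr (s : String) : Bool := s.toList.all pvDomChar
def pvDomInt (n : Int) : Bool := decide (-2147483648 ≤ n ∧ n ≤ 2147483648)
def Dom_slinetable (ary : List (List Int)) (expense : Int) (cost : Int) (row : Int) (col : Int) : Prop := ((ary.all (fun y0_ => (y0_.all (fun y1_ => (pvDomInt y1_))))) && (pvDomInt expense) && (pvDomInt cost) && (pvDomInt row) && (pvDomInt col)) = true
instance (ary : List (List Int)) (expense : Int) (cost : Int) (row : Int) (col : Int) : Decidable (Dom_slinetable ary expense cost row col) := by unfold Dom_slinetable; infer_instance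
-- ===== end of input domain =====

-- B drops A's running accumulator (closed form expense*(i+1), one slice assignment per row);
-- both mutate ary in Python — the equivalence proved is about the RETURN value.

-- ===== PORT A =====
-- Loop body of A; inside Pre_ all indices are in range (out-of-range set is a no-op and
-- getD supplies a default exactly where Python would raise, which Pre_ excludes).
def aStep (expense cost : Int) (st : List (List Int) × Int) (i : Int) : List (List Int) × Int :=
  let a := st.1
  let acm := st.2
  let r0 := (a.getD i.toNat []).set 0 i                 -- ary[i][0] = i
  let r1 := r0.set 1 expense                            -- ary[i][1] = expense
  let r2 := r1.set 2 (expense + acm)                    -- ary[i][2] = expense + acm_exp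
  let r3 := r2.set 3 (cost - r2.getD 2 0)               -- ary[i][3] = cost - ary[i][2]
  (a.set i.toNat r3, r2.getD 2 0)                       -- acm_exp = ary[i][2]

def slinetable (ary : List (List Int)) (expense : Int) (cost : Int) (row : Int) (col : Int) : List (List Int) :=
  ((PySem.List.pyRange 0 row 1).foldl (aStep expense cost) (ary, 0)).1

-- ===== PORT B =====
-- Loop body of B: ary[i][:4] = [i, expense, dep, cost - dep]
-- (slice assignment l[:4] = new is exactly new ++ l[4:]).
def bStep (expense cost : Int) (a : List (List Int)) (i : Int) : List (List Int) :=
  let dep := expense * (i + 1)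
  a.set i.toNat ([i, expense, dep, cost - dep] ++ PySem.List.slice (a.getD i.toNat []) (some 4) none)

def slinetable_alt (ary : List (List Int)) (expense : Int) (cost : Int) (row : Int) (col : Int) : List (List Int) :=
  (PySem.List.pyRange 0 row 1).foldl (bStep expense cost) ary

-- ===== PRECONDITION & SPEC =====
-- Pre_ excludes exactly the inputs on which A raises IndexError: row exceeding len(ary),
-- or one of the first row rows having fewer than 4 entries.
def Pre_slinetable (ary : List (List Int)) (expense : Int) (cost : Int) (row : Int) (col : Int) : Prop :=
  row ≤ (ary.length : Int) ∧ ∀ r ∈ ary.take row.toNat, 4 ≤ r.length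
instance (ary : List (List Int)) (expense : Int) (cost : Int) (row : Int) (col : Int) : Decidable (Pre_slinetable ary expense cost row col) := by unfold Pre_slinetable; infer_instance

def pvWitness_slinetable : List (List Int) × Int × Int × Int × Int :=
  ([[0,0,0,0],[0,0,0,0]], 5, 100, 2, 4)

def Spec_slinetable (ary : List (List Int)) (expense : Int) (cost : Int) (row : Int) (col : Int) (out : List (List Int)) : Prop := out = slinetable_alt ary expense cost row col
instance (ary : List (List Int)) (expense : Int) (cost : Int) (row : Int) (col : Int) (out : List (List Int)) : Decidable (Spec_slinetable ary expense cost row col out) := by unfold Spec_slinetable; infer_instance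

-- ===== CLAIM (what is proved, stated in full; the proofs are below) =====
def Claim_equal_slinetable : Prop := ∀ (ary : List (List Int)) (expense : Int) (cost : Int) (row : Int) (col : Int), Dom_slinetable ary expense cost row col → Pre_slinetable ary expense cost row col → Spec_slinetable ary expense cost row col (slinetable ary expense cost row col)

-- ===== LEMMAS AND PROOFS =====

/-- Common description of the result: row at offset `s` gets the closed-form entries iff `s < b`. -/
def fill (e c b : Int) : Int → List (List Int) → List (List Int)
  | _, [] => []
  | s, r :: t =>
      (if s < b then [s, e, e * (s + 1), c - e * (s + 1)] ++ r.drop 4 else r) :: fill e c b (s + 1) t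

theorem fill_ge (e c b s : Int) (a : List (List Int)) (h : b ≤ s) : fill e c b s a = a := by
  induction a generalizing s with
  | nil => rfl
  | cons r t ih =>
      simp only [fill, if_neg (by omega : ¬ s < b)]
      rw [ih (s + 1) (by omega)]

theorem fill_getD (e c b s : Int) (a : List (List Int)) (k : Nat) (h : b ≤ s + k) :
    (fill e c b s a).getD k [] = a.getD k [] := by
  induction a generalizing s k with
  | nil => rfl
  | cons r t ih =>
      cases k with
      | zero =>
          simp only [fill, List.getD]
          rw [if_neg (by omega : ¬ s < b)]
          rfl
      | succ k =>
          simp only [fill, List.getD_cons_succ]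
          exact ih (s + 1) k (by omega)

theorem fill_set (e c s : Int) (a : List (List Int)) (k : Nat) (hk : k < a.length) :
    (fill e c (s + k) s a).set k
        ([s + k, e, e * ((s + k) + 1), c - e * ((s + k) + 1)] ++ (a.getD k []).drop 4)
      = fill e c (s + k + 1) s a := by
  induction a generalizing s k with
  | nil => simp at hk
  | cons r t ih =>
      cases k with
      | zero =>
          simp only [Nat.cast_zero, add_zero, fill, List.getD_cons_zero, List.set_cons_zero]
          rw [if_pos (by omega : s < s + 1)]
          rw [fill_ge e c s (s+1) t (by omega), fill_ge e c (s+1) (s+1) t (by omega)]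
      | succ k =>
          have h1 : s + ((k : Int) + 1) = (s + 1) + (k : Int) := by ring
          simp only [Nat.cast_add, Nat.cast_one, fill, List.set_cons_succ, List.getD_cons_succ]
          rw [if_pos (by omega : s < s + ((k:Int) + 1)), if_pos (by omega : s < s + ((k:Int)+1) + 1)]
          congr 1
          rw [h1]
          exact ih (s + 1) k (by simp at hk; omega)

theorem sets_eq (r : List Int) (i e acm c : Int) (h : 4 ≤ r.length) :
    (((r.set 0 i).set 1 e).set 2 (e + acm)).getD 2 0 = e + acm ∧
    (((r.set 0 i).set 1 e).set 2 (e + acm)).set 3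
        (c - (((r.set 0 i).set 1 e).set 2 (e + acm)).getD 2 0)
      = [i, e, e + acm, c - (e + acm)] ++ r.drop 4 := by
  match r with
  | x0 :: x1 :: x2 :: x3 :: t => simp [List.set]

theorem slice4_drop (r : List Int) : PySem.List.slice r (some (4:Int)) none = r.drop 4 := by
  rw [PySem.List.slice_from]
  · have h4 : (4:Int).toNat = 4 := rfl
    norm_num [h4]
  · norm_num

theorem loopA (e c : Int) (n : Nat) (a : List (List Int)) (hn : n ≤ a.length)
    (hlen : ∀ r ∈ a.take n, 4 ≤ r.length) :
    (List.range n).foldl (fun st (k : Nat) => aStep e c st (k : Int)) (a, 0)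
      = (fill e c (n : Int) 0 a, e * n) := by
  induction n with
  | zero => simp [fill_ge e c 0 0 a le_rfl]
  | succ n ih =>
      rw [List.range_succ, List.foldl_append]
      have hn' : n ≤ a.length := by omega
      have hlen' : ∀ r ∈ a.take n, 4 ≤ r.length := by
        intro r hr
        have : a.take n = (a.take (n+1)).take n := by
          rw [List.take_take]
          congr 1
          omega
        rw [this] at hr
        exact hlen r (List.take_subset _ _ hr)
      rw [ih hn' hlen']
      have hrn : (fill e c (n : Int) 0 a).getD n [] = a.getD n [] :=
        fill_getD e c (n : Int) 0 a n (by omega)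
      have hmem : a.getD n [] ∈ a.take (n + 1) := by
        have hlt : n < a.length := by omega
        have : a.getD n [] = a[n] := List.getD_eq_getElem a [] hlt
        rw [this]
        have h2 : (a.take (n+1))[n]'(by simp; omega) = a[n] := List.getElem_take
        rw [← h2]
        exact List.getElem_mem _
      have hr4 : 4 ≤ (a.getD n []).length := hlen _ hmem
      obtain ⟨hget, hset⟩ := sets_eq (a.getD n []) (n : Int) e (e * n) c hr4
      show aStep e c (fill e c (n : Int) 0 a, e * n) (n : Int) = _
      simp only [aStep, Int.toNat_natCast, hrn]
      rw [hset, hget]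
      have hfs := fill_set e c 0 a n (by omega)
      simp only [zero_add] at hfs
      have harith : e + e * (n : Int) = e * ((n : Int) + 1) := by ring
      rw [harith, hfs]
      push_cast
      rfl

theorem loopB (e c : Int) (n : Nat) (a : List (List Int)) (hn : n ≤ a.length) :
    (List.range n).foldl (fun a' (k : Nat) => bStep e c a' (k : Int)) a
      = fill e c (n : Int) 0 a := by
  induction n with
  | zero => simp [fill_ge e c 0 0 a le_rfl]
  | succ n ih =>
      rw [List.range_succ, List.foldl_append]
      rw [ih (by omega)]
      have hrn : (fill e c (n : Int) 0 a).getD n [] = a.getD n [] :=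
        fill_getD e c (n : Int) 0 a n (by omega)
      show bStep e c (fill e c (n : Int) 0 a) (n : Int) = _
      simp only [bStep, Int.toNat_natCast, hrn, slice4_drop]
      have hfs := fill_set e c 0 a n (by omega)
      simp only [zero_add] at hfs
      rw [hfs]
      push_cast
      rfl

theorem main_eq (ary : List (List Int)) (e c row col : Int)
    (h : Pre_slinetable ary e c row col) :
    slinetable ary e c row col = slinetable_alt ary e c row col := by
  obtain ⟨h1, h2⟩ := h
  unfold slinetable slinetable_alt
  rw [PySem.List.pyRange_one]
  simp only [sub_zero, zero_add, List.foldl_map]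
  have hn : row.toNat ≤ ary.length := by omega
  rw [loopA e c row.toNat ary hn h2, loopB e c row.toNat ary hn]

-- ===== VERDICT (by name: the statement is the Claim_ definition above) =====
theorem slinetable_spec : Claim_equal_slinetable := by
  intro ary e c row col _ hpre
  exact main_eq ary e c row col hpre
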